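-- pv_equiv track=rewrite | github.com/Haoran-Jiang/group_testing_with_dilution | group_test_dilution.py | name_fun
-- ===== SOURCE A (Python) =====
-- def name_fun(n):
--     """
--     input: stopping rule
--     output: finish nodes
--     """
--
--     output = []
--     temp = ['']
--     for i in range(2*n - 1):
--         temp_cur = []
--         for j in temp:
--             candidate_pos = j + '+'
--             candidate_neg = j + '-'
--             if str.count(candidate_pos, '+') >= n:
--                 output.append(candidate_pos)
--             else:
--                 temp_cur.append(candidate_pos)
--             if str.count(candidate_neg, '-') >= n:
--                 output.append(candidate_neg)
--             else:
--                 temp_cur.append(candidate_neg)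
--
--         temp = temp_cur
--
--     neg_symbol = [x for x in output if str.count(x, '-') == n]
--     pos_symbol = [x for x in output if str.count(x, '+') == n]
--
--     return output, neg_symbol, pos_symbol
-- ===== SOURCE B (Python) =====
-- def name_fun(n):
--     """
--     input: stopping rule
--     output: finish nodes
--     """
--
--     def level(p, m, r):
--         # stopping strings of length exactly r, given p '+' and m '-' still
--         # allowed before stopping; lexicographic order ('+' before '-')
--         if r == 0:
--             return [''] if p == 0 or m == 0 else []
--         if p == 0 or m == 0:
--             return []
--         return ['+' + s for s in level(p - 1, m, r - 1)] \
--              + ['-' + s for s in level(p, m - 1, r - 1)]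
--
--     output = [s for r in range(n, 2 * n) for s in level(n, n, r)]
--     neg_symbol = [x for x in output if x.count('-') == n]
--     pos_symbol = [x for x in output if x.count('+') == n]
--     return output, neg_symbol, pos_symbol
-- ===== Notes on version B (the rewrite author's own statement) =====
-- stated objective: alternative
-- what changed: A's breadth-first frontier loop (carrying all unfinished strings level by level and re-counting symbols in every candidate) is replaced by a direct recursive generator that, for each possible stopping length, enumerates the stopping strings of that length by structural recursion on the remaining '+'/'-' budgets, so no frontier list and no per-string counting is needed.
import Mathlib
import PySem

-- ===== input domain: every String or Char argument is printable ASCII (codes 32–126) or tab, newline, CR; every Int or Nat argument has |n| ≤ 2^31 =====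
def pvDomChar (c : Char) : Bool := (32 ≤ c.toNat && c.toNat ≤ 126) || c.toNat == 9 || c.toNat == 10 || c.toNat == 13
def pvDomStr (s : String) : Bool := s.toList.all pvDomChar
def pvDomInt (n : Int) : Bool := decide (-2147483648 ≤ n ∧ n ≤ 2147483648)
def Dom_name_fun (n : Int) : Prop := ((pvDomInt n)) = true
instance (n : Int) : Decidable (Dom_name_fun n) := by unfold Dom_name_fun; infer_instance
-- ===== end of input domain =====

-- B replaces A's breadth-first frontier loop by a direct recursive generator of the
-- stopping strings of each length (objective: alternative decomposition, similar cost).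
-- Both ports model Python strings as List Char (PySem's string model) and convert with
-- String.ofList only when building the returned triple; the values are identical.

-- ===== PORT A =====
-- body of A's inner 'for j in temp' loop: state = (output, temp_cur)
def nfInner (n : Int) (st2 : List (List Char) × List (List Char)) (j : List Char) :
    List (List Char) × List (List Char) :=
  let cp := j ++ ['+']
  let cn := j ++ ['-']
  let st3 := if ((PySem.Chars.count cp ['+'] : Int)) ≥ n
             then (st2.1 ++ [cp], st2.2) else (st2.1, st2.2 ++ [cp])
  if ((PySem.Chars.count cn ['-'] : Int)) ≥ n
  then (st3.1 ++ [cn], st3.2) else (st3.1, st3.2 ++ [cn])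

def name_fun (n : Int) : List String × List String × List String :=
  let st := (PySem.List.pyRange 0 (2*n - 1) 1).foldl
    (fun (st : List (List Char) × List (List Char)) _i =>
      st.2.foldl (nfInner n) (st.1, ([] : List (List Char))))
    (([] : List (List Char)), [([] : List Char)])
  let output := st.1
  let neg_symbol := output.filter (fun x => (PySem.Chars.count x ['-'] : Int) == n)
  let pos_symbol := output.filter (fun x => (PySem.Chars.count x ['+'] : Int) == n)
  (output.map String.ofList, neg_symbol.map String.ofList, pos_symbol.map String.ofList)

-- ===== PORT B =====
-- Source B's helper 'level(p, m, r)'.  Source B's r is an int; here it is the structural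
-- recursion parameter (r.toNat at the call site) — exact, because every call site has
-- r ≥ 0 (the elements of range(n, 2*n) are ≥ n ≥ 1 whenever that range is nonempty)
-- and the recursion only steps r-1 after the r == 0 test.
def nfLevel (p m : Int) : Nat → List (List Char)
  | 0 => if p = 0 ∨ m = 0 then [[]] else []
  | r + 1 =>
      if p = 0 ∨ m = 0 then []
      else (nfLevel (p - 1) m r).map (fun s => '+' :: s)
           ++ (nfLevel p (m - 1) r).map (fun s => '-' :: s)

def name_fun_alt (n : Int) : List String × List String × List String :=
  let output := (PySem.List.pyRange n (2*n) 1).flatMap (fun r => nfLevel n n r.toNat)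
  let neg_symbol := output.filter (fun x => (PySem.Chars.count x ['-'] : Int) == n)
  let pos_symbol := output.filter (fun x => (PySem.Chars.count x ['+'] : Int) == n)
  (output.map String.ofList, neg_symbol.map String.ofList, pos_symbol.map String.ofList)

-- ===== PRECONDITION & SPEC =====
def Spec_name_fun (n : Int) (out : List String × List String × List String) : Prop := out = name_fun_alt n
instance (n : Int) (out : List String × List String × List String) : Decidable (Spec_name_fun n out) := by unfold Spec_name_fun; infer_instance

-- ===== CLAIM (what is proved, stated in full; the proofs are below) =====
def Claim_equal_name_fun : Prop := ∀ (n : Int), Dom_name_fun n → Spec_name_fun n (name_fun n)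

-- ===== LEMMAS AND PROOFS =====

-- PySem.Chars.count with a single-character needle is List.count
theorem nf_count_go_singleton (c : Char) :
    ∀ (fuel : Nat) (l : List Char) (acc : Nat), l.length ≤ fuel →
      PySem.Chars.count.go [c] fuel l acc = acc + l.count c := by
  intro fuel
  induction fuel with
  | zero => intro l acc h; simp at h; subst h; simp [PySem.Chars.count.go]
  | succ f ih =>
    intro l acc h
    cases l with
    | nil => simp [PySem.Chars.count.go]
    | cons x t =>
      simp only [PySem.Chars.count.go]
      by_cases hx : x = c
      · subst hx
        have : List.isPrefixOf [x] (x :: t) = true := by simp [List.isPrefixOf]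
        rw [if_pos this]
        simp only [List.length_singleton, List.drop_one, List.tail_cons]
        simp only [List.length_cons] at h
        rw [ih t (acc + 1) (by omega)]
        simp
        omega
      · have : List.isPrefixOf [c] (x :: t) = false := by
          simp [List.isPrefixOf]
          exact fun hc => (hx hc.symm).elim
        rw [if_neg (by simp [this])]
        simp only [List.length_cons] at h
        rw [ih t acc (by omega)]
        simp [hx]

theorem nf_count_singleton (cs : List Char) (c : Char) :
    PySem.Chars.count cs [c] = cs.count c := by
  simp [PySem.Chars.count]
  rw [nf_count_go_singleton c cs.length cs 0 le_rfl]; omega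

theorem nf_level_empty : ∀ (r : Nat) (p m : Int), (r : Int) < p → (r : Int) < m →
    nfLevel p m r = [] := by
  intro r
  induction r with
  | zero => intro p m hp hm; simp [nfLevel]; omega
  | succ r ih =>
    intro p m hp hm
    push_cast at hp hm
    simp only [nfLevel, if_neg (show ¬(p = 0 ∨ m = 0) by omega)]
    rw [ih (p - 1) m (by omega) (by omega), ih p (m - 1) (by omega) (by omega)]
    simp

-- A's two per-level actions, read off the inner loop: kept frontier and finished nodes
def nfStepT (n : Int) (t : List (List Char)) : List (List Char) :=
  t.flatMap (fun j =>
    (if ((PySem.Chars.count (j ++ ['+']) ['+'] : Int)) ≥ n then [] else [j ++ ['+']])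
    ++ (if ((PySem.Chars.count (j ++ ['-']) ['-'] : Int)) ≥ n then [] else [j ++ ['-']]))

def nfStepF (n : Int) (t : List (List Char)) : List (List Char) :=
  t.flatMap (fun j =>
    (if ((PySem.Chars.count (j ++ ['+']) ['+'] : Int)) ≥ n then [j ++ ['+']] else [])
    ++ (if ((PySem.Chars.count (j ++ ['-']) ['-'] : Int)) ≥ n then [j ++ ['-']] else []))

theorem nf_inner_eq (n : Int) :
    ∀ (t out tc : List (List Char)),
      t.foldl (nfInner n) (out, tc) = (out ++ nfStepF n t, tc ++ nfStepT n t) := by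
  intro t
  induction t with
  | nil => intro out tc; simp [nfStepF, nfStepT]
  | cons j t ih =>
    intro out tc
    simp only [List.foldl_cons, nfStepF, nfStepT, List.flatMap_cons]
    rw [show nfInner n (out, tc) j
        = (out ++ ((if ((PySem.Chars.count (j ++ ['+']) ['+'] : Int)) ≥ n then [j ++ ['+']] else [])
            ++ (if ((PySem.Chars.count (j ++ ['-']) ['-'] : Int)) ≥ n then [j ++ ['-']] else [])),
           tc ++ ((if ((PySem.Chars.count (j ++ ['+']) ['+'] : Int)) ≥ n then [] else [j ++ ['+']])
            ++ (if ((PySem.Chars.count (j ++ ['-']) ['-'] : Int)) ≥ n then [] else [j ++ ['-']]))) from by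
      simp only [nfInner]
      split <;> split <;> simp
    ]
    rw [ih]
    simp [nfStepF, nfStepT]

-- the unfinished frontier after r levels, as a generator over remaining budgets
def nfU (p m : Int) : Nat → List (List Char)
  | 0 => if p ≤ 0 ∨ m ≤ 0 then [] else [[]]
  | r + 1 =>
      if p ≤ 0 ∨ m ≤ 0 then []
      else (nfU (p - 1) m r).map (fun s => '+' :: s)
           ++ (nfU p (m - 1) r).map (fun s => '-' :: s)

-- A's outer loop, abstracted: output contribution and frontier after k levels
def nfAOut (n : Int) : Nat → List (List Char) → List (List Char)
  | 0, _ => []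
  | k + 1, t => nfStepF n t ++ nfAOut n k (nfStepT n t)

def nfATemp (n : Int) : Nat → List (List Char) → List (List Char)
  | 0, t => t
  | k + 1, t => nfATemp n k (nfStepT n t)

theorem nf_outer_eq (n : Int) :
    ∀ (l : List Int) (out t : List (List Char)),
      l.foldl (fun (st : List (List Char) × List (List Char)) _i =>
          st.2.foldl (nfInner n) (st.1, ([] : List (List Char)))) (out, t)
        = (out ++ nfAOut n l.length t, nfATemp n l.length t) := by
  intro l
  induction l with
  | nil => intro out t; simp [nfAOut, nfATemp]
  | cons i l ih =>
    intro out t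
    simp only [List.foldl_cons, List.length_cons]
    rw [nf_inner_eq n t out [], ih]
    simp [nfAOut, nfATemp]

theorem nfU_nonpos (p m : Int) (r : Nat) (h : p ≤ 0 ∨ m ≤ 0) : nfU p m r = [] := by
  cases r <;> simp [nfU, h]

theorem nfLevel_succ_guard (p m : Int) (r : Nat) (h : p = 0 ∨ m = 0) : nfLevel p m (r + 1) = [] := by
  simp [nfLevel, h]

theorem nf_core (n : Int) :
    ∀ (r : Nat) (p m : Int) (pref : List Char), 1 ≤ p → 1 ≤ m →
      (pref.count '+' : Int) + p = n → (pref.count '-' : Int) + m = n →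
      nfStepT n ((nfU p m r).map (pref ++ ·)) = (nfU p m (r + 1)).map (pref ++ ·)
      ∧ nfStepF n ((nfU p m r).map (pref ++ ·)) = (nfLevel p m (r + 1)).map (pref ++ ·) := by
  intro r
  induction r with
  | zero =>
    intro p m pref hp hm hcp hcm
    have hg : ¬(p ≤ 0 ∨ m ≤ 0) := by omega
    have hg' : ¬(p = 0 ∨ m = 0) := by omega
    have hcp1 : ((PySem.Chars.count (pref ++ ['+']) ['+'] : Int)) = n - p + 1 := by
      rw [nf_count_singleton]; simp; omega
    have hcm1 : ((PySem.Chars.count (pref ++ ['-']) ['-'] : Int)) = n - m + 1 := by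
      rw [nf_count_singleton]; simp; omega
    have hcondp : (n ≤ ((PySem.Chars.count (pref ++ ['+']) ['+'] : Int))) ↔ p = 1 := by
      rw [hcp1]; omega
    have hcondm : (n ≤ ((PySem.Chars.count (pref ++ ['-']) ['-'] : Int))) ↔ m = 1 := by
      rw [hcm1]; omega
    constructor
    · simp only [nfU, if_neg hg, List.map_cons, List.map_nil, List.append_nil,
        nfStepT, List.flatMap_cons, List.flatMap_nil, ge_iff_le]
      by_cases hp1 : p = 1 <;> by_cases hm1 : m = 1 <;>
        simp [hcondp, hcondm, hp1, hm1] <;>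
        (split_ifs <;> first | omega | simp)
    · simp only [nfU, if_neg hg, List.map_cons, List.map_nil, List.append_nil,
        nfStepF, List.flatMap_cons, List.flatMap_nil, ge_iff_le]
      by_cases hp1 : p = 1 <;> by_cases hm1 : m = 1 <;>
        simp [hcondp, hcondm, hp1, hm1, nfLevel,
          show (p - 1 = 0 ∨ m = 0) ↔ p = 1 from by omega,
          show (p = 0 ∨ m - 1 = 0) ↔ m = 1 from by omega] <;>
        (split_ifs <;> first | omega | simp)
  | succ r ih =>
    intro p m pref hp hm hcp hcm
    have hg : ¬(p ≤ 0 ∨ m ≤ 0) := by omega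
    have hg' : ¬(p = 0 ∨ m = 0) := by omega
    have hmapP : ∀ (xs : List (List Char)),
        (xs.map (fun s => '+' :: s)).map (pref ++ ·) = xs.map ((pref ++ ['+']) ++ ·) := by
      intro xs; simp [List.map_map, Function.comp_def]
    have hmapM : ∀ (xs : List (List Char)),
        (xs.map (fun s => '-' :: s)).map (pref ++ ·) = xs.map ((pref ++ ['-']) ++ ·) := by
      intro xs; simp [List.map_map, Function.comp_def]
    have hTapp : ∀ (xs ys : List (List Char)), nfStepT n (xs ++ ys) = nfStepT n xs ++ nfStepT n ys := by
      intro xs ys; simp [nfStepT]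
    have hFapp : ∀ (xs ys : List (List Char)), nfStepF n (xs ++ ys) = nfStepF n xs ++ nfStepF n ys := by
      intro xs ys; simp [nfStepF]
    have hPside : nfStepT n ((nfU (p - 1) m r).map ((pref ++ ['+']) ++ ·))
          = (nfU (p - 1) m (r + 1)).map ((pref ++ ['+']) ++ ·)
        ∧ nfStepF n ((nfU (p - 1) m r).map ((pref ++ ['+']) ++ ·))
          = (nfLevel (p - 1) m (r + 1)).map ((pref ++ ['+']) ++ ·) := by
      by_cases hp1 : p = 1
      · subst hp1
        rw [nfU_nonpos (1 - 1) m r (by omega), nfU_nonpos (1 - 1) m (r + 1) (by omega),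
          nfLevel_succ_guard (1 - 1) m r (by omega)]
        constructor <;> simp [nfStepT, nfStepF]
      · exact ih (p - 1) m (pref ++ ['+']) (by omega) hm
          (by simp; omega) (by simp; omega)
    have hMside : nfStepT n ((nfU p (m - 1) r).map ((pref ++ ['-']) ++ ·))
          = (nfU p (m - 1) (r + 1)).map ((pref ++ ['-']) ++ ·)
        ∧ nfStepF n ((nfU p (m - 1) r).map ((pref ++ ['-']) ++ ·))
          = (nfLevel p (m - 1) (r + 1)).map ((pref ++ ['-']) ++ ·) := by
      by_cases hm1 : m = 1
      · subst hm1
        rw [nfU_nonpos p (1 - 1) r (by omega), nfU_nonpos p (1 - 1) (r + 1) (by omega),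
          nfLevel_succ_guard p (1 - 1) r (by omega)]
        constructor <;> simp [nfStepT, nfStepF]
      · exact ih p (m - 1) (pref ++ ['-']) hp (by omega)
          (by simp; omega) (by simp; omega)
    constructor
    · show nfStepT n ((nfU p m (r + 1)).map (pref ++ ·)) = (nfU p m (r + 1 + 1)).map (pref ++ ·)
      rw [show nfU p m (r + 1)
          = (nfU (p - 1) m r).map (fun s => '+' :: s) ++ (nfU p (m - 1) r).map (fun s => '-' :: s) from by
            simp [nfU, hg]]
      rw [List.map_append, hmapP, hmapM, hTapp, hPside.1, hMside.1]
      rw [show nfU p m (r + 1 + 1)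
          = (nfU (p - 1) m (r + 1)).map (fun s => '+' :: s) ++ (nfU p (m - 1) (r + 1)).map (fun s => '-' :: s) from by
            simp [nfU, hg]]
      rw [List.map_append, hmapP, hmapM]
    · show nfStepF n ((nfU p m (r + 1)).map (pref ++ ·)) = (nfLevel p m (r + 1 + 1)).map (pref ++ ·)
      rw [show nfU p m (r + 1)
          = (nfU (p - 1) m r).map (fun s => '+' :: s) ++ (nfU p (m - 1) r).map (fun s => '-' :: s) from by
            simp [nfU, hg]]
      rw [List.map_append, hmapP, hmapM, hFapp, hPside.2, hMside.2]
      rw [show nfLevel p m (r + 1 + 1)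
          = (nfLevel (p - 1) m (r + 1)).map (fun s => '+' :: s) ++ (nfLevel p (m - 1) (r + 1)).map (fun s => '-' :: s) from by
            simp [nfLevel, hg']]
      rw [List.map_append, hmapP, hmapM]

theorem nf_stepTF_nfU (n : Int) (hn : 1 ≤ n) (i : Nat) :
    nfStepT n (nfU n n i) = nfU n n (i + 1)
    ∧ nfStepF n (nfU n n i) = nfLevel n n (i + 1) := by
  have h := nf_core n i n n [] hn hn (by simp) (by simp)
  simpa using h

theorem nf_aOut_join (n : Int) (hn : 1 ≤ n) :
    ∀ (k i : Nat), nfAOut n k (nfU n n i)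
      = (List.range k).flatMap (fun d => nfLevel n n (i + 1 + d)) := by
  intro k
  induction k with
  | zero => intro i; simp [nfAOut]
  | succ k ih =>
    intro i
    show nfStepF n (nfU n n i) ++ nfAOut n k (nfStepT n (nfU n n i)) = _
    rw [(nf_stepTF_nfU n hn i).2, (nf_stepTF_nfU n hn i).1, ih (i + 1)]
    rw [List.range_succ_eq_map]
    simp only [List.flatMap_cons, List.flatMap_map]
    have hfe : (fun d => nfLevel n n (i + 1 + 1 + d)) = (fun a => nfLevel n n (i + 1 + (a + 1))) := by
      funext d; congr 1; omega
    rw [hfe]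

theorem nf_join_shift (n : Int) (hn : 1 ≤ n) :
    (List.range (2 * n.toNat - 1)).flatMap (fun d => nfLevel n n (0 + 1 + d))
      = (List.range n.toNat).flatMap (fun k => nfLevel n n (n.toNat + k)) := by
  have h2 : 2 * n.toNat - 1 = (n.toNat - 1) + n.toNat := by omega
  rw [h2, List.range_add]
  simp only [List.flatMap_append, List.flatMap_map]
  have h1 : (List.range (n.toNat - 1)).flatMap (fun d => nfLevel n n (0 + 1 + d)) = [] := by
    rw [List.flatMap_eq_nil_iff]
    intro d hd
    have hdlt := List.mem_range.mp hd
    exact nf_level_empty (0 + 1 + d) n n (by push_cast; omega) (by push_cast; omega)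
  rw [h1, List.nil_append]
  have hfe : (fun k => nfLevel n n (0 + 1 + (n.toNat - 1 + k))) = (fun k => nfLevel n n (n.toNat + k)) := by
    funext k; congr 1; omega
  rw [hfe]

theorem nf_out_core (n : Int) :
    ((PySem.List.pyRange 0 (2*n - 1) 1).foldl
      (fun (st : List (List Char) × List (List Char)) _i =>
        st.2.foldl (nfInner n) (st.1, ([] : List (List Char))))
      (([] : List (List Char)), [([] : List Char)])).1
    = (PySem.List.pyRange n (2*n) 1).flatMap (fun r => nfLevel n n r.toNat) := by
  by_cases hn : 1 ≤ n
  · rw [nf_outer_eq n _ [] [([] : List Char)]]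
    rw [show [([] : List Char)] = nfU n n 0 from by simp [nfU]; omega]
    simp only [PySem.List.length_pyRange_one]
    rw [nf_aOut_join n hn]
    rw [show (2*n - 1 - 0).toNat = 2 * n.toNat - 1 from by omega]
    rw [nf_join_shift n hn]
    rw [PySem.List.pyRange_one n (2*n)]
    rw [List.flatMap_map]
    have hfe : (fun k : Nat => nfLevel n n ((n + (k : Int)).toNat)) = (fun k : Nat => nfLevel n n (n.toNat + k)) := by
      funext k; congr 1; omega
    rw [show (2*n - n).toNat = n.toNat from by omega, hfe]
    simp
  · rw [PySem.List.pyRange_one_eq_nil (show 2*n - 1 ≤ 0 from by omega),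
        PySem.List.pyRange_one_eq_nil (show 2*n ≤ n from by omega)]
    simp

-- ===== VERDICT (by name: the statement is the Claim_ definition above) =====
theorem name_fun_spec : Claim_equal_name_fun := by
  intro n _hdom
  show name_fun n = name_fun_alt n
  unfold name_fun name_fun_alt
  simp only []
  rw [nf_out_core n]
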